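-- pv_equiv track=rewrite | github.com/andreilrt/Shanon | Funciones.py | fill_binary
-- ===== SOURCE A (Python) =====
-- def fill_binary(longitud,position):
-- 	new_block = []
-- 	for i in range(longitud):
-- 		if i <= position:
-- 			new_block.append('0')
-- 		else:
-- 			new_block.append('1')
-- 	return new_block
-- ===== SOURCE B (Python) =====
-- def fill_binary(longitud, position):
--     num_zeros = max(0, min(position + 1, longitud))
--     return ['0'] * num_zeros + ['1'] * (longitud - num_zeros)
-- ===== Notes on version B (the rewrite author's own statement) =====
-- stated objective: simpler
-- what changed: Replaces the per-index loop with a branch by a clamped zero-count computed in closed form plus two list replications concatenated.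
import Mathlib
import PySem

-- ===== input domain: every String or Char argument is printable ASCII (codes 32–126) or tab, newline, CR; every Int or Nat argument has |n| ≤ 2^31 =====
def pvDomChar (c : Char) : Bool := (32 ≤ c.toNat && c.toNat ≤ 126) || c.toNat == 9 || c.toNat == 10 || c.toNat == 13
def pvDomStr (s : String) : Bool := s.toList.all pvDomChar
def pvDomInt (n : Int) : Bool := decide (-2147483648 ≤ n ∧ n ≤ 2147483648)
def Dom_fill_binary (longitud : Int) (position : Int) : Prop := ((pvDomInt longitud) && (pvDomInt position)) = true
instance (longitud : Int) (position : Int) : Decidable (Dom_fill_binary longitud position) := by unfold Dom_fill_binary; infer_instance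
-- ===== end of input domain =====

-- B replaces A's per-index loop-and-branch with a clamped zero-count in closed form plus two list replications (objective: simpler).


-- ===== PORT A =====
def fill_binary (longitud : Int) (position : Int) : List String :=
  (PySem.List.pyRange 0 longitud 1).foldl
    (fun new_block i => new_block ++ [if i ≤ position then "0" else "1"]) []

-- ===== PORT B =====
def fill_binary_alt (longitud : Int) (position : Int) : List String :=
  let num_zeros : Int := max 0 (min (position + 1) longitud)
  List.replicate num_zeros.toNat "0" ++ List.replicate (longitud - num_zeros).toNat "1"

-- ===== PRECONDITION & SPEC =====
def Spec_fill_binary (longitud : Int) (position : Int) (out : List String) : Prop := out = fill_binary_alt longitud position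
instance (longitud : Int) (position : Int) (out : List String) : Decidable (Spec_fill_binary longitud position out) := by unfold Spec_fill_binary; infer_instance

-- ===== CLAIM (what is proved, stated in full; the proofs are below) =====
def Claim_equal_fill_binary : Prop := ∀ (longitud : Int) (position : Int), Dom_fill_binary longitud position → Spec_fill_binary longitud position (fill_binary longitud position)

-- ===== LEMMAS AND PROOFS =====

theorem fill_binary_aux (p : Int) (n : Nat) :
    (PySem.List.pyRange 0 (n : Int) 1).foldl
      (fun new_block i => new_block ++ [if i ≤ p then "0" else "1"]) [] =
    List.replicate (max 0 (min (p + 1) (n : Int))).toNat "0" ++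
      List.replicate ((n : Int) - max 0 (min (p + 1) (n : Int))).toNat "1" := by
  induction n with
  | zero =>
      rw [PySem.List.pyRange_one_eq_nil (by norm_num)]
      simp only [Nat.cast_zero]
      have h1 : (max 0 (min (p + 1) (0 : Int))).toNat = 0 := by omega
      have h2 : ((0 : Int) - max 0 (min (p + 1) (0 : Int))).toNat = 0 := by omega
      rw [h1, h2]
      simp
  | succ n ih =>
      have hcast : ((n + 1 : Nat) : Int) = (n : Int) + 1 := by push_cast; ring
      rw [hcast, PySem.List.pyRange_one_succ_right (by positivity), List.foldl_append, ih]
      simp only [List.foldl_cons, List.foldl_nil]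
      by_cases h : (n : Int) ≤ p
      · rw [if_pos h]
        have hz : (max 0 (min (p + 1) (n : Int))).toNat = n := by omega
        have hz' : (max 0 (min (p + 1) ((n : Int) + 1))).toNat = n + 1 := by omega
        have ho : ((n : Int) - max 0 (min (p + 1) (n : Int))).toNat = 0 := by omega
        have ho' : (((n : Int) + 1) - max 0 (min (p + 1) ((n : Int) + 1))).toNat = 0 := by omega
        rw [hz, hz', ho, ho', List.replicate_succ' (n := n)]
        simp
      · rw [if_neg h]
        have hz' : (max 0 (min (p + 1) ((n : Int) + 1))).toNat
                 = (max 0 (min (p + 1) (n : Int))).toNat := by omega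
        have ho' : (((n : Int) + 1) - max 0 (min (p + 1) ((n : Int) + 1))).toNat
                 = ((n : Int) - max 0 (min (p + 1) (n : Int))).toNat + 1 := by omega
        rw [hz', ho', List.replicate_succ', List.append_assoc]

-- ===== VERDICT (by name: the statement is the Claim_ definition above) =====
theorem fill_binary_spec : Claim_equal_fill_binary := by
  intro l p _
  unfold Spec_fill_binary fill_binary fill_binary_alt
  by_cases hl : 0 ≤ l
  · have : l = ((l.toNat : Nat) : Int) := by omega
    rw [this, fill_binary_aux]
  · rw [PySem.List.pyRange_one_eq_nil (by omega)]
    have h1 : (max 0 (min (p + 1) l)).toNat = 0 := by omega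
    have h2 : (l - max 0 (min (p + 1) l)).toNat = 0 := by omega
    simp [h1, h2]
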